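-- pv_equiv track=rewrite | github.com/Inlinesoft/Python.Reference.Code | app1/src/app1/importers/parser/utils.py | extract_table_csv
-- ===== SOURCE A (Python) =====
-- def extract_table_csv(
--     reader, header_row_index, max_row_index=None, find_header=False
-- ):
--     """
--     Extract a table from csv file:
--         header_row_index: int
--             (start of the table scan, unless find_header is True)
--         max_row_index: int (default: None)
--             (if provided, will stop table scan at this row index)
--         find_header: bool
--             (if True, will assume heder row to be first
--             non empty row after header_row_index)
--     """
--     headers = []
--     result_rows = []
--
--     for i, row in enumerate(reader):
--         if i == header_row_index:
--             headers = row
--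
--         if find_header:
--             # placeholder for future impl.
--             raise "Not implemented"
--
--         # headers parser, row is now data row
--         if i > header_row_index:
--             values = {}
--             for key, cell_value in zip(headers, row):
--                 values[key] = cell_value
--             result_rows.append(values)
--
--         if max_row_index and i >= max_row_index:
--             break
--
--     return headers, result_rows
-- ===== SOURCE B (Python) =====
-- def extract_table_csv(
--     reader, header_row_index, max_row_index=None, find_header=False
-- ):
--     """Extract (headers, data-row dicts) from a csv reader by indexing and
--     slicing the materialized row list instead of scanning it row by row."""
--     if find_header:
--         raise NotImplementedError("find_header")
--     rows = list(reader)
--     stop = len(rows) if max_row_index is None else min(max_row_index + 1, len(rows))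
--     headers = rows[header_row_index] if 0 <= header_row_index < stop else []
--     data = [dict(zip(headers, row)) for row in rows[header_row_index + 1 : stop]]
--     return headers, data
-- ===== Notes on version B (the rewrite author's own statement) =====
-- stated objective: simpler
-- what changed: Replaces A's single streaming enumerate-loop with mutable headers, per-row branch tests and an early break by an index-and-slice decomposition: compute the scan end once, pick the header row by index, and map dict(zip(headers, row)) over one slice; Pre_ keeps to the natural domain (find_header False, header_row_index >= 0, max_row_index None or >= 0), excluding find_header=True (A raises on any non-empty reader, B always raises) and negative indices/limits, out-of-domain values on which A's silent empty-header scan and break-after-first-row are accidental.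
-- intended difference: When max_row_index is 0 (and there are rows past the scan end), A's truthiness test 'if max_row_index' treats 0 as no limit and returns the full table, while B stops the scan at row 0 as the docstring states; B's is the intended reading of 'will stop table scan at this row index'. — e.g. on extract_table_csv([["a"], ["1"], ["2"]], 0, some 0, false): A returns (["a"], [[("a", "1")], [("a", "2")]]), B returns (["a"], [])
-- outside the precondition, e.g. on extract_table_csv([], 0, None, True): A returns ([], []), B raises NotImplementedError; on extract_table_csv([['a'], ['b'], ['c']], -2, None, False): A returns ([], [{}, {}, {}]), B returns ([], [{}]); on extract_table_csv([['a']], 0, -2, False): A returns (['a'], []), B returns ([], [])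
import Mathlib
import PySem

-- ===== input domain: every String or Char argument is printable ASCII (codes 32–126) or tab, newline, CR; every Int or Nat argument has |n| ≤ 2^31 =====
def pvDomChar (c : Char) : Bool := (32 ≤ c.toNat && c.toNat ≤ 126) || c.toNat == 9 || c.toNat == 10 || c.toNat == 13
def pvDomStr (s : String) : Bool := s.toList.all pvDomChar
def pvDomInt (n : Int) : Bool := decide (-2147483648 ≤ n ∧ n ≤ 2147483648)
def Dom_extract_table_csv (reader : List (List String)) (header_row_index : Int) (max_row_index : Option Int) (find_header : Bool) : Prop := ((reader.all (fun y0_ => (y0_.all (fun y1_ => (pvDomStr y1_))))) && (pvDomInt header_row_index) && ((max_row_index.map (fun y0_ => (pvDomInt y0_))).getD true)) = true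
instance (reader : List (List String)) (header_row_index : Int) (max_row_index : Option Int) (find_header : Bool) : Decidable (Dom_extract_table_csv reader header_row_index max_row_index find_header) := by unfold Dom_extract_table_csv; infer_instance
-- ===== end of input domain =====

-- B replaces A's single streaming loop (mutable headers, per-row branch tests, early
-- break) by an index-and-slice decomposition: compute the scan end once, pick the header
-- row by index, and map dict(zip(headers, row)) over one slice. Objective: simpler.


-- ===== PORT A =====
-- the dict built from zip(headers, row) by inserting each pair in order
-- (A's inner `for key, cell_value in zip(...): values[key] = ...` loop and
-- Source B's `dict(zip(headers, row))` are this same insertion sequence)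
def pvRowDict (headers row : List String) : List (String × String) :=
  ((headers.zip row).foldl (fun d kv => PySem.Dict.insert d kv.1 kv.2)
    PySem.Dict.empty).items

-- A's `for i, row in enumerate(reader)` loop, carrying (headers, result_rows)
def csvGoA (header_row_index : Int) (max_row_index : Option Int) (find_header : Bool) :
    List (Int × List String) → List String → List (List (String × String)) →
    List String × List (List (String × String))
  | [], headers, result_rows => (headers, result_rows)
  | (i, row) :: rest, headers, result_rows =>
    let headers := if i = header_row_index then row else headers
    if find_header then
      -- Python: raise "Not implemented" (TypeError); excluded by Pre_
      (headers, result_rows)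
    else
      let result_rows :=
        if header_row_index < i then result_rows ++ [pvRowDict headers row]
        else result_rows
      if (match max_row_index with
          | some m => decide (m ≠ 0 ∧ m ≤ i)   -- `max_row_index and i >= max_row_index`
          | none => false) then
        (headers, result_rows)
      else
        csvGoA header_row_index max_row_index find_header rest headers result_rows

def extract_table_csv (reader : List (List String)) (header_row_index : Int) (max_row_index : Option Int) (find_header : Bool) : List String × (List (List (String × String))) :=
  csvGoA header_row_index max_row_index find_header (PySem.List.enumerate reader 0) [] []

-- ===== PORT B =====
def extract_table_csv_alt (reader : List (List String)) (header_row_index : Int) (max_row_index : Option Int) (find_header : Bool) : List String × (List (List (String × String))) :=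
  if find_header then
    -- Source B: raise NotImplementedError; excluded by Pre_
    ([], [])
  else
    let rows := reader
    let n : Int := PySem.List.len rows
    -- Source B: stop = len(rows) if max_row_index is None else min(max_row_index + 1, len(rows))
    let stop : Int := match max_row_index with | none => n | some m => min (m + 1) n
    let headers : List String :=
      if 0 ≤ header_row_index ∧ header_row_index < stop then
        PySem.List.pyGetD rows header_row_index []   -- rows[header_row_index], in range by the guard
      else []
    let data := (PySem.List.slice rows (some (header_row_index + 1)) (some stop)).map
      (fun row => pvRowDict headers row)
    (headers, data)

-- ===== PRECONDITION & SPEC =====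
-- Pre_ keeps to the function's natural domain: find_header=True is excluded because A
-- raises on it for every non-empty reader (B always raises); negative header_row_index
-- and negative max_row_index are out-of-domain index values on which A's silent
-- empty-header scan and break-after-first-row are accidental.
def Pre_extract_table_csv (reader : List (List String)) (header_row_index : Int) (max_row_index : Option Int) (find_header : Bool) : Prop :=
  find_header = false ∧ 0 ≤ header_row_index ∧ (∀ m : Int, max_row_index = some m → 0 ≤ m)
instance (reader : List (List String)) (header_row_index : Int) (max_row_index : Option Int) (find_header : Bool) : Decidable (Pre_extract_table_csv reader header_row_index max_row_index find_header) := by unfold Pre_extract_table_csv; infer_instance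

def pvWitness_extract_table_csv : List (List String) × Int × Option Int × Bool :=
  ([["a", "b"], ["1", "2"], ["3", "4"]], 0, some 2, false)

-- When max_row_index is 0 and rows remain past the scan end, A's truthiness test
-- `if max_row_index` treats 0 as no limit and returns the full table; B stops the scan
-- at row 0 as the docstring states, which is the intended reading.
def D_extract_table_csv (reader : List (List String)) (header_row_index : Int) (max_row_index : Option Int) (find_header : Bool) : Prop :=
  max_row_index = some 0 ∧ 0 ≤ header_row_index ∧
    (header_row_index + 1 < (reader.length : Int) ∨
     (1 ≤ header_row_index ∧ header_row_index + 1 = (reader.length : Int) ∧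
      reader.getD header_row_index.toNat [] ≠ []))
instance (reader : List (List String)) (header_row_index : Int) (max_row_index : Option Int) (find_header : Bool) : Decidable (D_extract_table_csv reader header_row_index max_row_index find_header) := by unfold D_extract_table_csv; infer_instance

def Spec_extract_table_csv (reader : List (List String)) (header_row_index : Int) (max_row_index : Option Int) (find_header : Bool) (out : List String × (List (List (String × String)))) : Prop := ¬ D_extract_table_csv reader header_row_index max_row_index find_header → out = extract_table_csv_alt reader header_row_index max_row_index find_header
instance (reader : List (List String)) (header_row_index : Int) (max_row_index : Option Int) (find_header : Bool) (out : List String × (List (List (String × String)))) : Decidable (Spec_extract_table_csv reader header_row_index max_row_index find_header out) := by unfold Spec_extract_table_csv; infer_instance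

def pvDiffWitness_extract_table_csv : List (List String) × Int × Option Int × Bool :=
  ([["a"], ["1"], ["2"]], 0, some 0, false)
def pvDiffWitnessOut_extract_table_csv : (List String × (List (List (String × String)))) × (List String × (List (List (String × String)))) :=
  ((["a"], [[("a", "1")], [("a", "2")]]), (["a"], []))

-- ===== CLAIM (what is proved, stated in full; the proofs are below) =====
def Claim_unchanged_extract_table_csv : Prop := ∀ (reader : List (List String)) (header_row_index : Int) (max_row_index : Option Int) (find_header : Bool), Dom_extract_table_csv reader header_row_index max_row_index find_header → Pre_extract_table_csv reader header_row_index max_row_index find_header → Spec_extract_table_csv reader header_row_index max_row_index find_header (extract_table_csv reader header_row_index max_row_index find_header)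
def Claim_changed_extract_table_csv : Prop := Dom_extract_table_csv (pvDiffWitness_extract_table_csv.1) (pvDiffWitness_extract_table_csv.2.1) (pvDiffWitness_extract_table_csv.2.2.1) (pvDiffWitness_extract_table_csv.2.2.2) ∧ Pre_extract_table_csv (pvDiffWitness_extract_table_csv.1) (pvDiffWitness_extract_table_csv.2.1) (pvDiffWitness_extract_table_csv.2.2.1) (pvDiffWitness_extract_table_csv.2.2.2) ∧ D_extract_table_csv (pvDiffWitness_extract_table_csv.1) (pvDiffWitness_extract_table_csv.2.1) (pvDiffWitness_extract_table_csv.2.2.1) (pvDiffWitness_extract_table_csv.2.2.2) ∧ extract_table_csv (pvDiffWitness_extract_table_csv.1) (pvDiffWitness_extract_table_csv.2.1) (pvDiffWitness_extract_table_csv.2.2.1) (pvDiffWitness_extract_table_csv.2.2.2) = pvDiffWitnessOut_extract_table_csv.1 ∧ extract_table_csv_alt (pvDiffWitness_extract_table_csv.1) (pvDiffWitness_extract_table_csv.2.1) (pvDiffWitness_extract_table_csv.2.2.1) (pvDiffWitness_extract_table_csv.2.2.2) = pvDiffWitnessOut_extract_table_csv.2 ∧ pvDiffWitnessOut_extract_table_csv.1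 ≠ pvDiffWitnessOut_extract_table_csv.2
def Claim_exact_extract_table_csv : Prop := ∀ (reader : List (List String)) (header_row_index : Int) (max_row_index : Option Int) (find_header : Bool), Dom_extract_table_csv reader header_row_index max_row_index find_header → Pre_extract_table_csv reader header_row_index max_row_index find_header → D_extract_table_csv reader header_row_index max_row_index find_header → extract_table_csv reader header_row_index max_row_index find_header ≠ extract_table_csv_alt reader header_row_index max_row_index find_header

-- ===== LEMMAS AND PROOFS =====

-- number of rows A's loop still visits when it stands at absolute index i
def pvCnt (mri : Option Int) (i : Int) (len : Nat) : Nat :=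
  match mri with
  | none => len
  | some m => if m = 0 then len else min len (max (m + 1 - i) 1).toNat

-- the headers value A's loop ends with, from state h at absolute index i
def pvHdr (hri : Int) (mri : Option Int) (i : Int) (rows : List (List String))
    (h : List String) : List String :=
  if 0 ≤ hri - i ∧ hri - i < (pvCnt mri i rows.length : Int) then
    rows.getD (hri - i).toNat [] else h

-- the data rows A's loop appends, from state h at absolute index i
def pvData (hri : Int) (mri : Option Int) (i : Int) (rows : List (List String))
    (h : List String) : List (List (String × String)) :=
  ((rows.take (pvCnt mri i rows.length)).drop (hri + 1 - i).toNat).map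
    (fun r => pvRowDict (pvHdr hri mri i rows h) r)

-- A `break` step (the last row visited): the closed forms collapse to one row
lemma pvStep_break (hri : Int) (mri : Option Int) (i : Int) (r : List String)
    (rest : List (List String)) (h : List String)
    (hc : pvCnt mri i (rest.length + 1) = 1) :
    pvHdr hri mri i (r :: rest) h = (if i = hri then r else h) ∧
    pvData hri mri i (r :: rest) h
      = (if hri < i then [pvRowDict (if i = hri then r else h) r] else []) := by
  constructor
  · unfold pvHdr
    simp only [List.length_cons, hc]
    split_ifs with h1 h2 h2
    · have : hri - i = 0 := by omega
      simp [this]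
    · omega
    · omega
    · rfl
  · unfold pvData
    simp only [List.length_cons, hc, List.take_succ_cons, List.take_zero]
    by_cases hlt : hri < i
    · have h0 : (hri + 1 - i).toNat = 0 := by omega
      have hne : ¬ i = hri := by omega
      have hh : pvHdr hri mri i (r :: rest) h = h := by
        unfold pvHdr; rw [if_neg]; omega
      simp [h0, hlt, hh, hne]
    · have h1 : 1 ≤ (hri + 1 - i).toNat := by omega
      rw [if_neg hlt]
      cases hk : (hri + 1 - i).toNat with
      | zero => omega
      | succ k => simp

-- a non-break step: one row peels off the closed forms
lemma pvStep_cont (hri : Int) (mri : Option Int) (i : Int) (r : List String)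
    (rest : List (List String)) (h : List String)
    (hc : pvCnt mri i (rest.length + 1) = pvCnt mri (i + 1) rest.length + 1) :
    pvHdr hri mri i (r :: rest) h
      = pvHdr hri mri (i + 1) rest (if i = hri then r else h) ∧
    pvData hri mri i (r :: rest) h
      = (if hri < i then [pvRowDict (if i = hri then r else h) r] else [])
        ++ pvData hri mri (i + 1) rest (if i = hri then r else h) := by
  have hHdr : pvHdr hri mri i (r :: rest) h
      = pvHdr hri mri (i + 1) rest (if i = hri then r else h) := by
    unfold pvHdr
    simp only [List.length_cons, hc]
    by_cases hie : i = hri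
    · subst hie
      rw [if_pos (by constructor <;> omega), if_neg (by omega)]
      simp
    · by_cases hin : 0 ≤ hri - (i + 1) ∧ hri - (i + 1) < (pvCnt mri (i+1) rest.length : Int)
      · rw [if_pos (by push_cast; omega), if_pos hin]
        have hk : (hri - i).toNat = (hri - (i+1)).toNat + 1 := by omega
        simp [hk]
      · rw [if_neg (by push_cast; omega), if_neg hin, if_neg hie]
  refine ⟨hHdr, ?_⟩
  unfold pvData
  simp only [List.length_cons, hc, List.take_succ_cons]
  rw [hHdr]
  by_cases hlt : hri < i
  · have hne : ¬ i = hri := by omega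
    have hh : pvHdr hri mri (i + 1) rest h = h := by
      unfold pvHdr; rw [if_neg]; omega
    have h0 : (hri + 1 - i).toNat = 0 := by omega
    have h0' : (hri - i).toNat = 0 := by omega
    simp [hne, hh, hlt, h0, h0']
  · rw [if_neg hlt]
    have hk : (hri + 1 - i).toNat = (hri + 1 - (i + 1)).toNat + 1 := by omega
    simp [hk]

lemma csvGoA_eq (hri : Int) (mri : Option Int) :
    ∀ (rows : List (List String)) (i : Int) (h : List String)
      (acc : List (List (String × String))),
    csvGoA hri mri false (PySem.List.enumerate rows i) h acc
      = (pvHdr hri mri i rows h, acc ++ pvData hri mri i rows h) := by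
  intro rows
  induction rows with
  | nil =>
    intro i h acc
    have hc : pvCnt mri i ([] : List (List String)).length = 0 := by
      cases mri <;> simp [pvCnt]
    have hh : pvHdr hri mri i [] h = h := by
      unfold pvHdr; rw [if_neg]; rw [hc]; push_cast; omega
    simp [PySem.List.enumerate_nil, csvGoA, pvData, hh]
  | cons r rest ih =>
    intro i h acc
    rw [PySem.List.enumerate_cons]
    simp only [csvGoA, Bool.false_eq_true, if_false]
    by_cases hbr : (match mri with | some m => m ≠ 0 ∧ m ≤ i | none => False)
    · obtain ⟨m, hm⟩ : ∃ m, mri = some m := by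
        cases mri with
        | none => exact absurd hbr (by simp)
        | some m => exact ⟨m, rfl⟩
      subst hm
      simp only at hbr
      have hc : pvCnt (some m) i (rest.length + 1) = 1 := by
        simp only [pvCnt, if_neg hbr.1]; omega
      obtain ⟨hH, hD⟩ := pvStep_break hri (some m) i r rest h hc
      rw [if_pos (by simp [hbr.1, hbr.2])]
      rw [hH, hD]
      by_cases hlt : hri < i <;> simp [hlt]
    · have hc : pvCnt mri i (rest.length + 1) = pvCnt mri (i + 1) rest.length + 1 := by
        cases mri with
        | none => simp [pvCnt]
        | some m =>
          simp only at hbr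
          by_cases hm0 : m = 0
          · simp [pvCnt, hm0]
          · have hi : i < m := by
              by_contra hcon
              exact hbr ⟨hm0, by omega⟩
            simp only [pvCnt, if_neg hm0]
            omega
      obtain ⟨hH, hD⟩ := pvStep_cont hri mri i r rest h hc
      rw [if_neg (by cases mri with
            | none => simp
            | some m => simp only at hbr ⊢; simpa using hbr)]
      rw [ih (i + 1) (if i = hri then r else h)
        (if hri < i then acc ++ [pvRowDict (if i = hri then r else h) r] else acc)]
      rw [hH, hD]
      by_cases hlt : hri < i <;> simp [hlt]


-- A's closed forms equal B's body once B's scan end equals A's visited-row count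
lemma pvFinal (reader : List (List String)) (hri : Int) (mri : Option Int) (stop : Int)
    (hhri : 0 ≤ hri) (hst : stop = ((pvCnt mri 0 reader.length : Nat) : Int)) :
    (pvHdr hri mri 0 reader [], pvData hri mri 0 reader [])
      = (if 0 ≤ hri ∧ hri < stop then PySem.List.pyGetD reader hri [] else [],
         (PySem.List.slice reader (some (hri + 1)) (some stop)).map
           (fun row => pvRowDict
             (if 0 ≤ hri ∧ hri < stop then PySem.List.pyGetD reader hri [] else []) row)) := by
  have hHdr : pvHdr hri mri 0 reader []
      = (if 0 ≤ hri ∧ hri < stop then PySem.List.pyGetD reader hri [] else []) := by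
    unfold pvHdr
    by_cases hin : 0 ≤ hri ∧ hri < stop
    · rw [if_pos (by omega), if_pos hin]
      obtain ⟨k, rfl⟩ : ∃ k : Nat, hri = (k : Int) := ⟨hri.toNat, by omega⟩
      rw [PySem.List.pyGetD_natCast]
      simp
    · rw [if_neg (by omega), if_neg hin]
  refine Prod.ext hHdr ?_
  unfold pvData
  rw [hHdr]
  rw [PySem.List.slice_toNat reader (a := hri + 1) (b := stop) (by omega) (by omega)]
  rw [List.drop_take]
  have e1 : (hri + 1 - 0).toNat = (hri + 1).toNat := by omega
  have e2 : (pvCnt mri 0 reader.length) - (hri + 1).toNat = stop.toNat - (hri + 1).toNat := by omega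
  rw [e1, e2]

theorem extract_table_csv_spec : Claim_unchanged_extract_table_csv := by
  intro reader hri mri fh _ hpre hnd
  obtain ⟨hfh, hhri, hmri⟩ := hpre
  subst hfh
  rw [extract_table_csv, csvGoA_eq hri mri reader 0 [] []]
  simp only [extract_table_csv_alt, Bool.false_eq_true, if_false, List.nil_append,
    PySem.List.len_eq]
  rcases mri with _ | m
  · exact pvFinal reader hri none _ hhri (by simp [pvCnt])
  · by_cases hm0 : m = 0
    · subst hm0
      -- A treats max_row_index = 0 as no limit; outside D_ the results still agree
      have hcnt : pvCnt (some 0) 0 reader.length = reader.length := by simp [pvCnt]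
      have hnd' : ¬ (hri + 1 < (reader.length : Int) ∨
          (1 ≤ hri ∧ hri + 1 = (reader.length : Int) ∧
           reader.getD hri.toNat [] ≠ [])) := fun hd => hnd ⟨rfl, hhri, hd⟩
      push Not at hnd'
      obtain ⟨hlen, hedge⟩ := hnd'
      have hdropnil : reader.drop (hri + 1).toNat = [] :=
        List.drop_eq_nil_of_le (by omega)
      have hHdr : pvHdr hri (some 0) 0 reader []
          = (if 0 ≤ hri ∧ hri < min (0 + 1) ((reader.length : Nat) : Int) then
              PySem.List.pyGetD reader hri [] else []) := by
        unfold pvHdr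
        simp only [Int.sub_zero, hcnt]
        by_cases hA : 0 ≤ hri ∧ hri < ((reader.length : Nat) : Int)
        · rw [if_pos hA]
          by_cases h0 : hri = 0
          · subst h0
            rw [if_pos (by omega)]
            rw [show ((0 : Int)) = (((0 : Nat) : Int)) from rfl, PySem.List.pyGetD_natCast]
            simp
          · rw [if_neg (by omega)]
            exact hedge (by omega) (by omega)
        · rw [if_neg hA, if_neg (by omega)]
      refine Prod.ext hHdr ?_
      unfold pvData
      rw [hcnt, List.take_length]
      rw [PySem.List.slice_toNat reader (a := hri + 1)
        (b := min (0 + 1) ((reader.length : Nat) : Int)) (by omega) (by omega)]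
      rw [show (hri + 1 - 0).toNat = (hri + 1).toNat from by omega, hdropnil]
      simp
    · exact pvFinal reader hri (some m) _ hhri (by
        have h0 : 0 ≤ m := hmri m rfl
        simp only [pvCnt, if_neg hm0]
        push_cast
        omega)

theorem extract_table_csv_changed : Claim_changed_extract_table_csv := by
  unfold Claim_changed_extract_table_csv; decide

theorem extract_table_csv_tight : Claim_exact_extract_table_csv := by
  intro reader hri mri fh _ hpre hd
  obtain ⟨hfh, hhri, hmri⟩ := hpre
  subst hfh
  obtain ⟨hm, _, hdisj⟩ := hd
  subst hm
  rw [extract_table_csv, csvGoA_eq hri (some 0) reader 0 [] []]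
  simp only [extract_table_csv_alt, Bool.false_eq_true, if_false, List.nil_append,
    PySem.List.len_eq]
  have hcnt : pvCnt (some 0) 0 reader.length = reader.length := by simp [pvCnt]
  rcases hdisj with h1 | ⟨h1, h2, h3⟩
  · -- rows remain past the scan end: A returns them, B's data slice is empty
    intro heq
    have hsnd := congrArg Prod.snd heq
    rw [PySem.List.slice_toNat reader (a := hri + 1)
      (b := min (0 + 1) ((reader.length : Nat) : Int)) (by omega) (by omega)] at hsnd
    have ht0 : (min (0 + 1) ((reader.length : Nat) : Int)).toNat - (hri + 1).toNat = 0 := by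
      omega
    rw [ht0, List.take_zero, List.map_nil] at hsnd
    unfold pvData at hsnd
    have hlen := congrArg List.length hsnd
    simp only [hcnt, List.length_map, List.length_drop, List.length_take,
      List.length_nil] at hlen
    omega
  · -- A picks the last row as headers, B's scan end is row 0: headers differ
    intro heq
    have hfst := congrArg Prod.fst heq
    unfold pvHdr at hfst
    rw [hcnt] at hfst
    rw [if_pos (by constructor <;> omega)] at hfst
    rw [if_neg (by omega)] at hfst
    rw [show (hri - 0).toNat = hri.toNat from by omega] at hfst
    exact h3 hfst
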